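-- pv_equiv track=rewrite | github.com/EmersonAires/Introducao_a_ciencia_da_computacao_com_Python | Exercicios_Resolvidos/Parte 2/Semana 1/Tarefa _de_programação/soma_matrizes.py | le_matrizes
-- ===== SOURCE A (Python) =====
-- def le_matrizes(m1, m2):
--
--
--     linhas_a_mat = len(m1)
--     linhas_b_mat = len(m2)
--
--     matrizes_correspondentes = True
--
--     if linhas_a_mat == linhas_b_mat:
--         for i in range(linhas_a_mat):
--             if len(m1[i]) != len(m2[i]):
--                 matrizes_correspondentes = False
--     else:
--         matrizes_correspondentes = False
--
--     return matrizes_correspondentes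
-- ===== SOURCE B (Python) =====
-- def le_matrizes(m1, m2):
--     if not m1 and not m2:
--         return True
--     if not m1 or not m2:
--         return False
--     if len(m1[0]) != len(m2[0]):
--         return False
--     return le_matrizes(m1[1:], m2[1:])
-- ===== Notes on version B (the rewrite author's own statement) =====
-- stated objective: alternative
-- what changed: B is a structural recursion walking both matrices in lockstep, returning False at the first row-length mismatch or length imbalance and never computing len(m1)/len(m2) or indexing; A runs an index loop over the full range with a mutable flag and no early exit.
import Mathlib
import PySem

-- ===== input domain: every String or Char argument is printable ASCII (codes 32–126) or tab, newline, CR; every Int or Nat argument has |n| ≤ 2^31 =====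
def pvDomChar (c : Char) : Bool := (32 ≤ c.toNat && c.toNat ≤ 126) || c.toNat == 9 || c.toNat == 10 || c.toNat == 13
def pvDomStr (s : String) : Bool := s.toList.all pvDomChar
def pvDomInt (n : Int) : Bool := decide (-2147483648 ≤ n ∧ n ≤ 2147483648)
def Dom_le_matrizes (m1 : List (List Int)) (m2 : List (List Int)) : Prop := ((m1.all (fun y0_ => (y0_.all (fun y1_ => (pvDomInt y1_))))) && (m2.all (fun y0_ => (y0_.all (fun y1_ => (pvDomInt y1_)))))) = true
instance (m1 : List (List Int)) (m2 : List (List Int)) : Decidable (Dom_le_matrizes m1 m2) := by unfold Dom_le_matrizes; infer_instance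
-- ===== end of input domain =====

-- B replaces A's full index loop with a mutable flag by a lockstep structural recursion with early exit (objective: alternative decomposition, same cost).

-- ===== PORT A =====
-- index loop over range(len(m1)) with a boolean flag, as in A's Python
def le_matrizes (m1 : List (List Int)) (m2 : List (List Int)) : Bool :=
  let linhas_a_mat := m1.length
  let linhas_b_mat := m2.length
  let matrizes_correspondentes := true
  if linhas_a_mat = linhas_b_mat then
    (List.range linhas_a_mat).foldl
      (fun acc i =>
        if ((m1.getD i []).length ≠ (m2.getD i []).length) then false else acc)
      matrizes_correspondentes
  else
    false

-- ===== PORT B =====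
-- recursive lockstep walk: empty/empty → true; one empty → false; compare head rows, recurse on tails
def le_matrizes_alt : List (List Int) → List (List Int) → Bool
  | [], [] => true
  | [], _ :: _ => false
  | _ :: _, [] => false
  | r1 :: t1, r2 :: t2 =>
    if r1.length ≠ r2.length then false
    else le_matrizes_alt t1 t2

-- ===== PRECONDITION & SPEC =====
def Spec_le_matrizes (m1 : List (List Int)) (m2 : List (List Int)) (out : Bool) : Prop := out = le_matrizes_alt m1 m2
instance (m1 : List (List Int)) (m2 : List (List Int)) (out : Bool) : Decidable (Spec_le_matrizes m1 m2 out) := by unfold Spec_le_matrizes; infer_instance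

-- ===== CLAIM (what is proved, stated in full; the proofs are below) =====
def Claim_equal_le_matrizes : Prop := ∀ (m1 : List (List Int)) (m2 : List (List Int)), Dom_le_matrizes m1 m2 → Spec_le_matrizes m1 m2 (le_matrizes m1 m2)

-- ===== LEMMAS AND PROOFS =====

-- A's flag fold equals the conjunction of the per-index checks
theorem pv_fold_flag (m1 m2 : List (List Int)) :
    ∀ (l : List Nat) (acc : Bool),
      l.foldl (fun acc i =>
        if ((m1.getD i []).length ≠ (m2.getD i []).length) then false else acc) acc
      = (acc && l.all (fun i => (m1.getD i []).length == (m2.getD i []).length)) := by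
  intro l
  induction l with
  | nil => intro acc; simp
  | cons x xs ih =>
    intro acc
    rw [List.foldl_cons, List.all_cons, ih]
    by_cases h : (m1[x]?.getD []).length = (m2[x]?.getD []).length
    · rw [if_neg (by simpa [List.getD] using h)]
      simp [h]
    · rw [if_pos (by simpa [List.getD] using h)]
      cases acc <;> simp [h]

-- B's recursion equals equality of the two row-length lists
theorem pv_alt_eq_maps : ∀ (m1 m2 : List (List Int)),
    le_matrizes_alt m1 m2 = ((m1.map List.length) == (m2.map List.length)) := by
  intro m1
  induction m1 with
  | nil => intro m2; cases m2 <;> simp [le_matrizes_alt]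
  | cons r1 t1 ih =>
    intro m2
    cases m2 with
    | nil => simp [le_matrizes_alt]
    | cons r2 t2 =>
      by_cases h : r1.length = r2.length
      · simp [le_matrizes_alt, h, ih]
      · simp [le_matrizes_alt, h]

theorem pv_maps_eq_iff (m1 m2 : List (List Int)) (h : m1.length = m2.length) :
    (m1.map (fun row => row.length) = m2.map (fun row => row.length)) ↔
    (∀ i ∈ List.range m1.length, (m1.getD i []).length = (m2.getD i []).length) := by
  constructor
  · intro heq i hi
    rw [List.mem_range] at hi
    have h2 : i < m2.length := h ▸ hi
    have := congrArg (fun l => l.getD i 0) heq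
    simpa [List.getD, List.getElem?_map, hi, h2] using this
  · intro hall
    apply List.ext_getElem
    · simp [h]
    · intro i hi1 hi2
      simp only [List.length_map] at hi1 hi2
      have := hall i (List.mem_range.mpr hi1)
      simpa [List.getD, hi1, hi2] using this

-- ===== VERDICT (by name: the statement is the Claim_ definition above) =====
theorem le_matrizes_spec : Claim_equal_le_matrizes := by
  intro m1 m2 _
  unfold Spec_le_matrizes
  rw [pv_alt_eq_maps]
  simp only [le_matrizes]
  by_cases h : m1.length = m2.length
  · rw [if_pos h, pv_fold_flag, Bool.true_and]
    rcases Bool.eq_false_or_eq_true ((List.range m1.length).all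
        (fun i => (m1.getD i []).length == (m2.getD i []).length)) with hb | hb
    · rw [hb]
      symm
      rw [beq_iff_eq]
      rw [pv_maps_eq_iff m1 m2 h]
      rw [List.all_eq_true] at hb
      intro i hi
      simpa using hb i hi
    · rw [hb]
      symm
      rw [beq_eq_false_iff_ne]
      intro hmaps
      rw [pv_maps_eq_iff m1 m2 h] at hmaps
      rw [List.all_eq_false] at hb
      obtain ⟨i, hi, hne⟩ := hb
      exact absurd (by simpa using hmaps i hi) (by simpa using hne)
  · rw [if_neg h]
    symm
    rw [beq_eq_false_iff_ne]
    intro heq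
    exact h (by simpa using congrArg List.length heq)
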